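-- pv_equiv track=rewrite | github.com/MrSergey98/Phyton | LR1.py | elementsprevmin
-- ===== SOURCE A (Python) =====
-- def elementsprevmin(a):
--     min = a[0]
--     for i in a:
--         if i < min:
--             min = i
--     l = 0
--     for i in range(len(a)):
--         if a[i] == min:
--             l = i
--     return a[:l]
-- ===== SOURCE B (Python) =====
-- def elementsprevmin(a):
--     m = a[0]
--     last = 0
--     for i, x in enumerate(a):
--         if x < m:
--             m = x
--             last = i
--         elif x == m:
--             last = i
--     return a[:last]
-- ===== Notes on version B (the rewrite author's own statement) =====
-- stated objective: alternative
-- what changed: Fuses A's two passes (find the minimum, then rescan all indices for its last occurrence) into a single enumerate scan that tracks the running minimum and its last index together.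
import Mathlib
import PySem

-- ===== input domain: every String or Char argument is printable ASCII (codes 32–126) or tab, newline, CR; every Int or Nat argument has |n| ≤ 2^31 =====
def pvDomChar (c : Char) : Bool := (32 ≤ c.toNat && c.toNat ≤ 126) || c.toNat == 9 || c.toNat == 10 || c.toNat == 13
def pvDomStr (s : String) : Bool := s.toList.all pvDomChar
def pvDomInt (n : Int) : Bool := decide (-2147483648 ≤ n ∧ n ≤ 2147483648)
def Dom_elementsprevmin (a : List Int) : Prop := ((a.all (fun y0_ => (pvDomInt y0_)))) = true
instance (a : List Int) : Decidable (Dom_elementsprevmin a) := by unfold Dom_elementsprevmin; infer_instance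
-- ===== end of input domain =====

-- B fuses A's two passes (find minimum, then rescan for its last index) into one
-- enumerate scan tracking the running minimum and its last index together.

-- ===== PORT A =====
def elementsprevmin (a : List Int) : List Int :=
  match PySem.List.pyGet? a 0 with
  | none => []    -- indexing element 0 raises IndexError on the empty list; excluded by Pre_
  | some m0 =>
    let m := a.foldl (fun mn i => if i < mn then i else mn) m0
    let l := (PySem.List.pyRange 0 (a.length : Int) 1).foldl
        (fun l i => if PySem.List.pyGetD a i 0 = m then i else l) 0
    PySem.List.slice a none (some l)

-- ===== PORT B =====
def elementsprevmin_alt (a : List Int) : List Int :=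
  match a with
  | [] => []      -- indexing element 0 raises IndexError on the empty list; excluded by Pre_
  | h :: _ =>
    let s := (PySem.List.enumerate a 0).foldl
      (fun (s : Int × Int) (p : Int × Int) =>
        if p.2 < s.1 then (p.2, p.1) else if p.2 = s.1 then (s.1, p.1) else s)
      (h, 0)
    PySem.List.slice a none (some s.2)

-- ===== PRECONDITION & SPEC =====
-- Pre_ excludes only the empty list, on which the Python A raises IndexError reading its first element.
def Pre_elementsprevmin (a : List Int) : Prop := a ≠ []
instance (a : List Int) : Decidable (Pre_elementsprevmin a) := by unfold Pre_elementsprevmin; infer_instance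
def pvWitness_elementsprevmin : List Int := [3, 1, 2, 1, 5]
def Spec_elementsprevmin (a : List Int) (out : List Int) : Prop := out = elementsprevmin_alt a
instance (a : List Int) (out : List Int) : Decidable (Spec_elementsprevmin a out) := by unfold Spec_elementsprevmin; infer_instance

-- ===== CLAIM (what is proved, stated in full; the proofs are below) =====
def Claim_equal_elementsprevmin : Prop := ∀ (a : List Int), Dom_elementsprevmin a → Pre_elementsprevmin a → Spec_elementsprevmin a (elementsprevmin a)

-- ===== LEMMAS AND PROOFS =====

theorem pvEnumerate_append_singleton (xs : List Int) (x : Int) (s : Int) :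
    PySem.List.enumerate (xs ++ [x]) s
      = PySem.List.enumerate xs s ++ [(s + (xs.length : Int), x)] := by
  induction xs generalizing s with
  | nil => simp [PySem.List.enumerate_cons, PySem.List.enumerate_nil]
  | cons y ys ih =>
    simp only [List.cons_append, PySem.List.enumerate_cons, ih, List.length_cons]
    have h : s + 1 + (ys.length : Int) = s + ((ys.length : Int) + 1) := by ring
    push_cast
    rw [h]

-- fused one-pass scan = (minimum fold, last-index-of-minimum fold)
theorem pvMain (a : List Int) (m0 l0 : Int) :
    (PySem.List.enumerate a 0).foldl
      (fun (s : Int × Int) (p : Int × Int) =>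
        if p.2 < s.1 then (p.2, p.1) else if p.2 = s.1 then (s.1, p.1) else s)
      (m0, l0)
    = (a.foldl (fun mn i => if i < mn then i else mn) m0,
       (PySem.List.pyRange 0 (a.length : Int) 1).foldl
         (fun l i => if PySem.List.pyGetD a i 0
             = a.foldl (fun mn i => if i < mn then i else mn) m0 then i else l) l0) := by
  induction a using List.reverseRecOn generalizing m0 l0 with
  | nil => simp [PySem.List.enumerate_nil, PySem.List.pyRange_one_eq_nil]
  | append_singleton xs x ih =>
    have hlen : ((xs ++ [x]).length : Int) = (xs.length : Int) + 1 := by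
      simp
    -- pyGetD on the prefix indices agrees with pyGetD on xs
    have hpre : ∀ i ∈ PySem.List.pyRange 0 (xs.length : Int) 1,
        PySem.List.pyGetD (xs ++ [x]) i 0 = PySem.List.pyGetD xs i 0 := by
      intro i hi
      rw [PySem.List.mem_pyRange_one] at hi
      rw [PySem.List.pyGetD_eq_getElem _ 0 hi.1 (by simp; omega),
          PySem.List.pyGetD_eq_getElem _ 0 hi.1 (by exact_mod_cast hi.2)]
      rw [List.getElem_append_left]
    have hlast : PySem.List.pyGetD (xs ++ [x]) (xs.length : Int) 0 = x := by
      rw [PySem.List.pyGetD_eq_getElem _ 0 (by positivity) (by simp)]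
      simp
    have hrange : PySem.List.pyRange 0 ((xs ++ [x]).length : Int) 1
        = PySem.List.pyRange 0 (xs.length : Int) 1 ++ [(xs.length : Int)] := by
      rw [hlen, PySem.List.pyRange_one_succ_right (by positivity)]
    set M' := xs.foldl (fun mn i => if i < mn then i else mn) m0 with hM'
    rw [pvEnumerate_append_singleton, List.foldl_append, ih, hrange, List.foldl_append,
        ← hM']
    simp only [List.foldl_cons, List.foldl_nil, List.foldl_append, zero_add]
    rw [hlast]
    by_cases h1 : x < M'
    · simp only [if_pos h1]
      simp
    · simp only [if_neg h1]
      have hcongr : (PySem.List.pyRange 0 (xs.length : Int) 1).foldl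
          (fun l i => if PySem.List.pyGetD (xs ++ [x]) i 0 = M' then i else l) l0
          = (PySem.List.pyRange 0 (xs.length : Int) 1).foldl
          (fun l i => if PySem.List.pyGetD xs i 0 = M' then i else l) l0 :=
        PySem.List.foldl_congr_mem _ _ _ _ (fun acc i hi => by rw [hpre i hi])
      by_cases h2 : x = M'
      · simp only [if_pos h2]
      · simp only [if_neg h2]
        rw [hcongr]

-- ===== VERDICT (by name: the statement is the Claim_ definition above) =====
theorem elementsprevmin_spec : Claim_equal_elementsprevmin := by
  intro a _hdom hpre
  unfold Spec_elementsprevmin elementsprevmin elementsprevmin_alt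
  match a with
  | [] => exact absurd rfl hpre
  | h :: t =>
    rw [PySem.List.pyGet?_zero_cons]
    simp only [pvMain]
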